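-- pv_equiv track=rewrite | github.com/kagnag/school | CT121/lab1.py | lap_1st
-- ===== SOURCE A (Python) =====
-- def lap_1st(s):
--     result = s.split(" ")
--     tmp = set()
--     for i in result:
--         if i in tmp:
--             return i
--         else:
--             tmp.add(i)
--     return 'None'
-- ===== SOURCE B (Python) =====
-- def lap_1st(s):
--     words = s.split(" ")
--     best = None
--     for w in set(words):
--         if words.count(w) > 1:
--             first = words.index(w)
--             second = first + 1 + words[first + 1:].index(w)
--             if best is None or second < best:
--                 best = second
--     return words[best] if best is not None else 'None'
-- ===== Notes on version B (the rewrite author's own statement) =====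
-- stated objective: alternative
-- what changed: Instead of a single left-to-right scan with a seen-set, B works per distinct word: for each word occurring more than once it computes the index of its second occurrence (via index and a sliced second index search) and returns the word at the minimal such index.
import Mathlib
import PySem

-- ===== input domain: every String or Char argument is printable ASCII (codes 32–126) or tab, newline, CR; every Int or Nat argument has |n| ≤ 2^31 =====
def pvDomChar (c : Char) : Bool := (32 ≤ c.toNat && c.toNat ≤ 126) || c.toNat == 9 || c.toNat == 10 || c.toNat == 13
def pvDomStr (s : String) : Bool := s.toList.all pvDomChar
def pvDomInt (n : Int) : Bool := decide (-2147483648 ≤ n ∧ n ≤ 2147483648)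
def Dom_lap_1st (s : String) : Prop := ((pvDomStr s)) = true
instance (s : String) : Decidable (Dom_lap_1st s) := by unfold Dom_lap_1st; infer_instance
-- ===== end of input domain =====

-- B replaces A's single seen-set scan by a per-distinct-word computation: for each word occurring
-- more than once it finds the index of its second occurrence and returns the word at the minimal
-- such index (objective: alternative algorithm; return value only, no side effects).

-- ===== PORT A =====
-- the 'for i in result' loop with the growing set tmp
def lap1stLoopA (tmp : PySem.Set String) (ws : List String) : String :=
  match ws with
  | [] => "None"
  | w :: rest => if PySem.Set.contains tmp w then w else lap1stLoopA (PySem.Set.add tmp w) rest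

def lap_1st (s : String) : String :=
  lap1stLoopA PySem.Set.empty ((PySem.Str.split? s " ").getD [])

-- ===== PORT B =====
-- loop body: for w in set(words): if words.count(w) > 1: first = words.index(w);
--            second = first + 1 + words[first+1:].index(w); best = min-accumulate
def lap1stStepB (ws : List String) (best : Option Nat) (w : String) : Option Nat :=
  if 1 < PySem.List.count ws w then
    match PySem.List.index? ws w with
    | none => best  -- unreachable: count > 1 means w ∈ ws
    | some first =>
      match PySem.List.index? (PySem.List.slice ws (some ((first : Int) + 1)) none) w with
      | none => best  -- unreachable: count > 1 means a second occurrence exists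
      | some j =>
        let second := first + 1 + j
        match best with
        | none => some second
        | some b => if second < b then some second else best
  else best

def lap_1st_alt (s : String) : String :=
  let ws := (PySem.Str.split? s " ").getD []
  match (PySem.Set.ofList ws).foldl (lap1stStepB ws) none with
  | none => "None"
  | some b =>
    match PySem.List.pyGet? ws (b : Int) with
    | some v => v
    | none => "None"  -- unreachable: best is a valid index

-- ===== PRECONDITION & SPEC =====
def Spec_lap_1st (s : String) (out : String) : Prop := out = lap_1st_alt s
instance (s : String) (out : String) : Decidable (Spec_lap_1st s out) := by unfold Spec_lap_1st; infer_instance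

-- ===== CLAIM (what is proved, stated in full; the proofs are below) =====
def Claim_equal_lap_1st : Prop := ∀ (s : String), Dom_lap_1st s → Spec_lap_1st s (lap_1st s)

-- ===== LEMMAS AND PROOFS =====

-- spec-level first-duplicate recursion (A's algorithm with the seen-set made an explicit prefix)
def fd? (pre rest : List String) : Option String :=
  match rest with
  | [] => none
  | w :: r => if w ∈ pre then some w else fd? (pre ++ [w]) r

-- second-occurrence index of w in ws (meaningful when w occurs at least twice)
def sidx (ws : List String) (w : String) : Nat :=
  match PySem.List.index? ws w with
  | none => 0
  | some f =>
    match PySem.List.index? (ws.drop (f + 1)) w with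
    | none => 0
    | some j => f + 1 + j

theorem loopA_fd (rest : List String) (tmp : PySem.Set String) (pre : List String)
    (h : ∀ x, x ∈ tmp ↔ x ∈ pre) :
    lap1stLoopA tmp rest = (fd? pre rest).getD "None" := by
  induction rest generalizing tmp pre with
  | nil => rfl
  | cons w r ih =>
    simp only [lap1stLoopA, fd?]
    by_cases hw : w ∈ pre
    · simp [PySem.Set.contains, (h w).2 hw, hw]
    · have hwt : w ∉ tmp := fun hx => hw ((h w).1 hx)
      rw [if_neg (by simp [PySem.Set.contains, hwt]), if_neg hw]
      apply ih
      intro x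
      simp [PySem.Set.mem_add, h x]

theorem fd_none (pre rest : List String) :
    fd? pre rest = none ↔ ∀ k (hk : k < rest.length), rest[k] ∉ pre ++ rest.take k := by
  induction rest generalizing pre with
  | nil => simp [fd?]
  | cons w r ih =>
    simp only [fd?]
    by_cases hw : w ∈ pre
    · simp only [if_pos hw]
      constructor
      · intro h; exact absurd h (by simp)
      · intro h
        have h0 := h 0 (by simp)
        simp at h0
        exact absurd hw h0
    · rw [if_neg hw, ih]
      constructor
      · intro h k hk
        match k, hk with
        | 0, _ => simpa using hw
        | (j+1), hk =>
          have := h j (by simpa using Nat.lt_of_succ_lt_succ hk)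
          simpa [List.append_assoc] using this
      · intro h j hj
        have := h (j+1) (by simpa using Nat.succ_lt_succ hj)
        simpa [List.append_assoc] using this

theorem fd_some (pre rest : List String) (v : String) (h : fd? pre rest = some v) :
    ∃ k, ∃ hk : k < rest.length, rest[k] = v ∧ rest[k] ∈ pre ++ rest.take k ∧
      ∀ j (hj : j < k), rest[j] ∉ pre ++ rest.take j := by
  induction rest generalizing pre with
  | nil => simp [fd?] at h
  | cons w r ih =>
    simp only [fd?] at h
    by_cases hw : w ∈ pre
    · rw [if_pos hw] at h
      refine ⟨0, by simp, by simpa using h.symm.symm, by simpa using hw, by omega⟩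
    · rw [if_neg hw] at h
      obtain ⟨k, hk, hv, hmem, hmin⟩ := ih (pre ++ [w]) h
      refine ⟨k + 1, by simpa using Nat.succ_lt_succ hk, by simpa using hv,
        by simpa [List.append_assoc] using hmem, ?_⟩
      intro j hj
      match j, hj with
      | 0, _ => simpa using hw
      | (j'+1), hj =>
        have := hmin j' (Nat.lt_of_succ_lt_succ hj)
        simpa [List.append_assoc] using this

theorem occ2 (ws : List String) (w : String) (h : 1 < PySem.List.count ws w) :
    ∃ f j, PySem.List.index? ws w = some f ∧ PySem.List.index? (ws.drop (f + 1)) w = some j ∧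
      sidx ws w = f + 1 + j := by
  have hcnt := h
  rw [PySem.List.count_eq] at hcnt
  have hmem : w ∈ ws := List.count_pos_iff.mp (by omega)
  obtain ⟨f, hidx⟩ : ∃ f, PySem.List.index? ws w = some f := by
    have := (PySem.List.index?_isSome_iff ws w).mpr hmem
    exact Option.isSome_iff_exists.mp this
  obtain ⟨hf, hwf, hmin⟩ := PySem.List.getElem_of_index?_eq_some hidx
  have hsplit : ws = ws.take (f + 1) ++ ws.drop (f + 1) := (List.take_append_drop _ _).symm
  have hnotin : w ∉ ws.take f := by
    intro hx
    obtain ⟨i, hi, hwi⟩ := List.mem_take_iff_getElem.mp hx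
    exact hmin i (by omega) (by simpa using hwi)
  have hc1 : (ws.take (f + 1)).count w = 1 := by
    rw [List.take_add_one, List.getElem?_eq_getElem hf, hwf]
    simp [List.count_append, List.count_eq_zero.mpr hnotin]
  have hcdrop : 0 < (ws.drop (f + 1)).count w := by
    have : ws.count w = (ws.take (f + 1)).count w + (ws.drop (f + 1)).count w := by
      conv_lhs => rw [hsplit]
      exact List.count_append ..
    omega
  have hmemd : w ∈ ws.drop (f + 1) := List.count_pos_iff.mp hcdrop
  obtain ⟨j, hjdx⟩ : ∃ j, PySem.List.index? (ws.drop (f + 1)) w = some j := by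
    have := (PySem.List.index?_isSome_iff _ w).mpr hmemd
    exact Option.isSome_iff_exists.mp this
  refine ⟨f, j, hidx, hjdx, ?_⟩
  unfold sidx
  simp only [hidx, hjdx]

theorem sidx_facts (ws : List String) (w : String) (h : 1 < PySem.List.count ws w) :
    ∃ hlt : sidx ws w < ws.length, ws[sidx ws w] = w ∧ w ∈ ws.take (sidx ws w) ∧
      ∀ i (hi : i < ws.length), ws[i] = w → ws[i] ∈ ws.take i → sidx ws w ≤ i := by
  obtain ⟨f, j, hidx, hjdx, hs⟩ := occ2 ws w h
  obtain ⟨hf, hwf, hmin⟩ := PySem.List.getElem_of_index?_eq_some hidx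
  obtain ⟨hj, hwj, hjmin⟩ := PySem.List.getElem_of_index?_eq_some hjdx
  have hjlen : j < ws.length - (f + 1) := by simpa using hj
  have hlt : sidx ws w < ws.length := by omega
  have hgw' : ws[sidx ws w]? = some w := by
    rw [hs, List.getElem?_eq_getElem (by omega : f + 1 + j < ws.length)]
    have : (ws.drop (f + 1))[j] = ws[f + 1 + j]'(by omega) := by
      simp [List.getElem_drop]
    rw [← this, hwj]
  have hgw : ws[sidx ws w] = w := by
    have := List.getElem?_eq_getElem hlt
    rw [this] at hgw'
    exact Option.some.inj hgw'
  refine ⟨hlt, hgw, ?_, ?_⟩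
  · refine List.mem_take_iff_getElem.mpr ⟨f, by omega, hwf⟩
  · intro i hi hwi hti
    obtain ⟨j0, hj0, hwj0⟩ := List.mem_take_iff_getElem.mp (hwi ▸ hti)
    have hfj0 : f ≤ j0 := by
      by_contra hcon
      exact hmin j0 (by omega) hwj0
    have hfi : f + 1 ≤ i := by omega
    have hd : i - (f + 1) < (ws.drop (f + 1)).length := by
      simp
      omega
    have hdw : (ws.drop (f + 1))[i - (f + 1)] = w := by
      have : (ws.drop (f + 1))[i - (f + 1)]'hd = ws[(f + 1) + (i - (f + 1))]'(by omega) := by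
        simp [List.getElem_drop]
      rw [this]
      have : (f + 1) + (i - (f + 1)) = i := by omega
      simp only [this]
      exact hwi
    have : ¬ (i - (f + 1) < j) := fun hc => hjmin _ hc hdw
    omega

theorem dup_to_candidate (ws : List String) (i : Nat) (hi : i < ws.length)
    (hd : ws[i] ∈ ws.take i) :
    1 < PySem.List.count ws ws[i] ∧ sidx ws ws[i] ≤ i := by
  have hcount : 1 < PySem.List.count ws ws[i] := by
    rw [PySem.List.count_eq]
    have hsplit : ws = ws.take i ++ ws.drop i := (List.take_append_drop _ _).symm
    have h1 : 0 < (ws.take i).count ws[i] := List.count_pos_iff.mpr hd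
    have h2 : 0 < (ws.drop i).count ws[i] := by
      refine List.count_pos_iff.mpr ?_
      rw [List.drop_eq_getElem_cons hi]
      exact List.mem_cons_self ..
    have hcc : ∀ x : String, ws.count x = (ws.take i).count x + (ws.drop i).count x := by
      intro x
      conv_lhs => rw [hsplit]
      exact List.count_append ..
    have := hcc ws[i]
    omega
  obtain ⟨_, _, _, hmin⟩ := sidx_facts ws ws[i] hcount
  exact ⟨hcount, hmin i hi rfl hd⟩

theorem step_count_le (ws : List String) (b : Option Nat) (w : String)
    (h : ¬ 1 < PySem.List.count ws w) : lap1stStepB ws b w = b := by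
  unfold lap1stStepB
  rw [if_neg h]

theorem step_count_gt (ws : List String) (b : Option Nat) (w : String)
    (h : 1 < PySem.List.count ws w) :
    lap1stStepB ws b w =
      match b with
      | none => some (sidx ws w)
      | some b0 => if sidx ws w < b0 then some (sidx ws w) else some b0 := by
  obtain ⟨f, j, hidx, hjdx, hs⟩ := occ2 ws w h
  unfold lap1stStepB
  rw [if_pos h]
  simp only [hidx]
  have hcast : ((f : Int) + 1) = ((f + 1 : Nat) : Int) := by push_cast; ring
  rw [hcast, PySem.List.slice_from_natCast]
  simp only [hjdx, hs]
  cases b <;> rfl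

theorem fold_none_iff (ws L : List String) :
    L.foldl (lap1stStepB ws) none = none ↔ ∀ w ∈ L, ¬ 1 < PySem.List.count ws w := by
  have gen : ∀ (L : List String) (b : Option Nat),
      L.foldl (lap1stStepB ws) b = none ↔ (b = none ∧ ∀ w ∈ L, ¬ 1 < PySem.List.count ws w) := by
    intro L
    induction L with
    | nil => simp
    | cons w L ih =>
      intro b
      simp only [List.foldl_cons, ih]
      by_cases hc : 1 < PySem.List.count ws w
      · rw [step_count_gt ws b w hc]
        cases b with
        | none =>
          constructor
          · rintro ⟨h1, -⟩; cases h1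
          · rintro ⟨-, hall⟩; exact absurd hc (hall w (List.mem_cons_self ..))
        | some b0 =>
          constructor
          · rintro ⟨h1, -⟩
            have h1' : (if sidx ws w < b0 then some (sidx ws w) else some b0) = none := h1
            by_cases hlt : sidx ws w < b0
            · rw [if_pos hlt] at h1'; cases h1'
            · rw [if_neg hlt] at h1'; cases h1'
          · rintro ⟨h1, -⟩; cases h1
      · rw [step_count_le ws b w hc]
        constructor
        · rintro ⟨hb, hL⟩
          exact ⟨hb, by
            intro x hx
            rcases List.mem_cons.mp hx with rfl | hx
            · exact hc
            · exact hL x hx⟩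
        · rintro ⟨hb, hL⟩
          exact ⟨hb, fun x hx => hL x (List.mem_cons_of_mem _ hx)⟩
  rw [gen L none]
  simp

theorem fold_some (ws L : List String) (b : Option Nat) (m : Nat)
    (h : L.foldl (lap1stStepB ws) b = some m) :
    ((b = some m) ∨ ∃ w ∈ L, 1 < PySem.List.count ws w ∧ sidx ws w = m) ∧
      (∀ x, b = some x → m ≤ x) ∧
      (∀ w ∈ L, 1 < PySem.List.count ws w → m ≤ sidx ws w) := by
  induction L generalizing b with
  | nil =>
    simp only [List.foldl_nil] at h
    refine ⟨Or.inl h, ?_, by simp⟩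
    intro x hx
    rw [h] at hx
    exact le_of_eq (Option.some.inj hx)
  | cons w L ih =>
    simp only [List.foldl_cons] at h
    by_cases hc : 1 < PySem.List.count ws w
    · rw [step_count_gt ws b w hc] at h
      cases b with
      | none =>
        obtain ⟨h1, h2, h3⟩ := ih _ h
        refine ⟨?_, by simp, ?_⟩
        · rcases h1 with h1 | ⟨x, hx, hcx, hsx⟩
          · exact Or.inr ⟨w, List.mem_cons_self .., hc, Option.some.inj h1⟩
          · exact Or.inr ⟨x, List.mem_cons_of_mem _ hx, hcx, hsx⟩
        · intro x hx hcx
          rcases List.mem_cons.mp hx with rfl | hx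
          · exact h2 _ rfl
          · exact h3 x hx hcx
      | some b0 =>
        have h' : List.foldl (lap1stStepB ws) (if sidx ws w < b0 then some (sidx ws w) else some b0) L = some m := h
        by_cases hlt : sidx ws w < b0
        · rw [if_pos hlt] at h'
          obtain ⟨h1, h2, h3⟩ := ih _ h'
          have hms : m ≤ sidx ws w := h2 _ rfl
          refine ⟨?_, ?_, ?_⟩
          · rcases h1 with h1 | ⟨x, hx, hcx, hsx⟩
            · exact Or.inr ⟨w, List.mem_cons_self .., hc, Option.some.inj h1⟩
            · exact Or.inr ⟨x, List.mem_cons_of_mem _ hx, hcx, hsx⟩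
          · intro x hxx
            have : x = b0 := Option.some.inj hxx.symm ▸ rfl
            cases hxx
            omega
          · intro x hx hcx
            rcases List.mem_cons.mp hx with rfl | hx
            · exact hms
            · exact h3 x hx hcx
        · rw [if_neg hlt] at h'
          obtain ⟨h1, h2, h3⟩ := ih _ h'
          have hmb : m ≤ b0 := h2 _ rfl
          refine ⟨?_, ?_, ?_⟩
          · rcases h1 with h1 | ⟨x, hx, hcx, hsx⟩
            · exact Or.inl (by rw [← h1])
            · exact Or.inr ⟨x, List.mem_cons_of_mem _ hx, hcx, hsx⟩
          · intro x hxx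
            cases hxx
            omega
          · intro x hx hcx
            rcases List.mem_cons.mp hx with rfl | hx
            · omega
            · exact h3 x hx hcx
    · rw [step_count_le ws b w hc] at h
      obtain ⟨h1, h2, h3⟩ := ih _ h
      refine ⟨?_, h2, ?_⟩
      · rcases h1 with h1 | ⟨x, hx, hcx, hsx⟩
        · exact Or.inl h1
        · exact Or.inr ⟨x, List.mem_cons_of_mem _ hx, hcx, hsx⟩
      · intro x hx hcx
        rcases List.mem_cons.mp hx with rfl | hx
        · exact absurd hcx hc
        · exact h3 x hx hcx

theorem main_eq (ws : List String) :
    lap1stLoopA PySem.Set.empty ws =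
      (match (PySem.Set.ofList ws).foldl (lap1stStepB ws) none with
        | none => "None"
        | some b =>
          match PySem.List.pyGet? ws (b : Int) with
          | some v => v
          | none => "None") := by
  rw [loopA_fd ws PySem.Set.empty [] (by intro x; simp [PySem.Set.empty])]
  cases hF : (PySem.Set.ofList ws).foldl (lap1stStepB ws) none with
  | none =>
    have hall := (fold_none_iff ws _).mp hF
    have hnone : fd? [] ws = none := by
      rw [fd_none]
      intro k hk hmem
      simp only [List.nil_append] at hmem
      have hc := (dup_to_candidate ws k hk hmem).1
      exact hall ws[k] ((PySem.Set.mem_ofList _ _).mpr (List.getElem_mem hk)) hc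
    rw [hnone]
    rfl
  | some m =>
    obtain ⟨h1, h2, h3⟩ := fold_some ws _ none m hF
    rcases h1 with h1 | ⟨w, hwL, hcw, hsw⟩
    · cases h1
    subst hsw
    obtain ⟨hlt, hgw, hmemtake, hminw⟩ := sidx_facts ws w hcw
    have hrhs : PySem.List.pyGet? ws ((sidx ws w : Nat) : Int) = some ws[sidx ws w] := by
      rw [PySem.List.pyGet?_natCast, List.getElem?_eq_getElem hlt]
    cases hfd : fd? [] ws with
    | none =>
      exfalso
      have := (fd_none [] ws).mp hfd (sidx ws w) hlt
      simp only [List.nil_append] at this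
      rw [hgw] at this
      exact this hmemtake
    | some v =>
      obtain ⟨k, hk, hkv, hkmem, hkmin⟩ := fd_some [] ws v hfd
      simp only [List.nil_append] at hkmem hkmin
      have hks : k ≤ sidx ws w := by
        by_contra hcon
        have hmin2 := hkmin (sidx ws w) (by omega)
        rw [hgw] at hmin2
        exact hmin2 hmemtake
      have hsk : sidx ws w ≤ k := by
        obtain ⟨hck, hskk⟩ := dup_to_candidate ws k hk hkmem
        have := h3 ws[k] ((PySem.Set.mem_ofList _ _).mpr (List.getElem_mem hk)) hck
        omega
      have hkm : k = sidx ws w := by omega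
      subst hkm
      simp [hrhs, hkv]

-- ===== VERDICT (by name: the statement is the Claim_ definition above) =====
theorem lap_1st_spec : Claim_equal_lap_1st := by
  intro s _
  unfold Spec_lap_1st lap_1st lap_1st_alt
  exact main_eq _
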